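-- pv_equiv track=rewrite | github.com/wangbxj1234/marco-voice-v16v2-inference | cosyvoice_emosphere/flow/streaming_loss.py | build_stream_chunk_pairs
-- ===== SOURCE A (Python) =====
-- def build_stream_chunk_pairs(total_frames: int, hop_frames: int, overlap_frames: int, max_pairs: int) -> list[tuple[int, int, int, int]]:
--     pairs: list[tuple[int, int, int, int]] = []
--     if total_frames <= 0 or hop_frames <= 0 or overlap_frames <= 0 or max_pairs <= 0:
--         return pairs
--     start = 0
--     while len(pairs) < max_pairs:
--         left_s = start
--         left_e = start + hop_frames + overlap_frames
--         right_s = start + hop_frames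
--         right_e = start + (2 * hop_frames) + overlap_frames
--         if right_e > total_frames:
--             break
--         pairs.append((left_s, left_e, right_s, right_e))
--         start += hop_frames
--     return pairs
-- ===== SOURCE B (Python) =====
-- def build_stream_chunk_pairs(total_frames: int, hop_frames: int, overlap_frames: int, max_pairs: int) -> list[tuple[int, int, int, int]]:
--     if total_frames <= 0 or hop_frames <= 0 or overlap_frames <= 0 or max_pairs <= 0:
--         return []
--     m = total_frames - overlap_frames - 2 * hop_frames
--     count = 0 if m < 0 else min(max_pairs, m // hop_frames + 1)
--     return [(k * hop_frames,
--              k * hop_frames + hop_frames + overlap_frames,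
--              k * hop_frames + hop_frames,
--              k * hop_frames + 2 * hop_frames + overlap_frames)
--             for k in range(count)]
-- ===== Notes on version B (the rewrite author's own statement) =====
-- stated objective: simpler
-- what changed: The while-loop with a runtime break is replaced by solving the stop condition in closed form: the number of pairs is min(max_pairs, (total_frames - overlap_frames - 2*hop_frames) // hop_frames + 1) (0 if negative), and the list is one comprehension over that range.
import Mathlib
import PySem

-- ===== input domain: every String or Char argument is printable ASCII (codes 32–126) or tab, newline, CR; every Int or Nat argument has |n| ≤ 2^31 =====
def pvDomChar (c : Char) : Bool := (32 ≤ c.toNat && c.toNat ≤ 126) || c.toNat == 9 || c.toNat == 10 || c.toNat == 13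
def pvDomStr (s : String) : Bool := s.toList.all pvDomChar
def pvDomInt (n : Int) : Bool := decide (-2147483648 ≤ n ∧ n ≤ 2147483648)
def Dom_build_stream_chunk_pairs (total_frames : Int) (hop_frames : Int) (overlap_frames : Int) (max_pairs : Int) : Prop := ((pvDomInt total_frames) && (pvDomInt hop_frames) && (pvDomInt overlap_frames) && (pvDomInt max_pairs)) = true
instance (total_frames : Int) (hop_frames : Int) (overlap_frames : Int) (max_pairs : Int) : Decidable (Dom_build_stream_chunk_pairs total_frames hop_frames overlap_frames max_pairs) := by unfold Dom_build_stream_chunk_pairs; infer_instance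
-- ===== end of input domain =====

-- B replaces A's while/break loop by a closed-form pair count and one comprehension (objective: simpler).
-- ===== PORT A =====
-- the while-loop: fuel = max_pairs - len(pairs); appends become cons before the recursive call
def pvALoop (T h o : Int) : Nat → Int → List (Int × Int × Int × Int)
  | 0, _ => []
  | n + 1, start =>
      if start + 2 * h + o > T then []
      else (start, start + h + o, start + h, start + 2 * h + o) :: pvALoop T h o n (start + h)

def build_stream_chunk_pairs (total_frames : Int) (hop_frames : Int) (overlap_frames : Int) (max_pairs : Int) : List (Int × Int × Int × Int) :=
  if total_frames ≤ 0 ∨ hop_frames ≤ 0 ∨ overlap_frames ≤ 0 ∨ max_pairs ≤ 0 then []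
  else pvALoop total_frames hop_frames overlap_frames max_pairs.toNat 0

-- ===== PORT B =====
def build_stream_chunk_pairs_alt (total_frames : Int) (hop_frames : Int) (overlap_frames : Int) (max_pairs : Int) : List (Int × Int × Int × Int) :=
  if total_frames ≤ 0 ∨ hop_frames ≤ 0 ∨ overlap_frames ≤ 0 ∨ max_pairs ≤ 0 then []
  else
    -- m and count are named locals in Source B; inlined here (same expressions)
    (PySem.List.pyRange 0
      (if total_frames - overlap_frames - 2 * hop_frames < 0 then 0
       else min max_pairs
         (PySem.Int.floordiv (total_frames - overlap_frames - 2 * hop_frames) hop_frames + 1)) 1).map (fun k =>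
      (k * hop_frames,
       k * hop_frames + hop_frames + overlap_frames,
       k * hop_frames + hop_frames,
       k * hop_frames + 2 * hop_frames + overlap_frames))

-- ===== PRECONDITION & SPEC =====
def Spec_build_stream_chunk_pairs (total_frames : Int) (hop_frames : Int) (overlap_frames : Int) (max_pairs : Int) (out : List (Int × Int × Int × Int)) : Prop := out = build_stream_chunk_pairs_alt total_frames hop_frames overlap_frames max_pairs
instance (total_frames : Int) (hop_frames : Int) (overlap_frames : Int) (max_pairs : Int) (out : List (Int × Int × Int × Int)) : Decidable (Spec_build_stream_chunk_pairs total_frames hop_frames overlap_frames max_pairs out) := by unfold Spec_build_stream_chunk_pairs; infer_instance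

-- ===== CLAIM (what is proved, stated in full; the proofs are below) =====
def Claim_equal_build_stream_chunk_pairs : Prop := ∀ (total_frames : Int) (hop_frames : Int) (overlap_frames : Int) (max_pairs : Int), Dom_build_stream_chunk_pairs total_frames hop_frames overlap_frames max_pairs → Spec_build_stream_chunk_pairs total_frames hop_frames overlap_frames max_pairs (build_stream_chunk_pairs total_frames hop_frames overlap_frames max_pairs)

-- ===== LEMMAS AND PROOFS =====

-- ===== VERDICT (by name: the statement is the Claim_ definition above) =====
-- number of pairs the loop can still emit from position `start` (ignoring the fuel cap)
def pvAvail (T h o start : Int) : Nat :=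
  if start + 2 * h + o ≤ T then ((T - o - 2 * h - start) / h).toNat + 1 else 0

theorem pvAvail_step (T h o start : Int) (hh : 0 < h) (hle : start + 2 * h + o ≤ T) :
    pvAvail T h o start = pvAvail T h o (start + h) + 1 := by
  have hN : 0 ≤ T - o - 2 * h - start := by omega
  by_cases hle2 : start + h + 2 * h + o ≤ T
  · have hsub : (T - o - 2 * h - (start + h)) / h = (T - o - 2 * h - start) / h + -1 := by
      have := Int.add_mul_ediv_right (T - o - 2 * h - start) (-1) (by omega : h ≠ 0)
      have heq : T - o - 2 * h - (start + h) = T - o - 2 * h - start + -1 * h := by ring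
      rw [heq, this]
    have h1 : 1 ≤ (T - o - 2 * h - start) / h := by
      rw [Int.le_ediv_iff_mul_le hh]; omega
    simp only [pvAvail, if_pos hle, if_pos hle2, hsub]
    omega
  · have h0 : (T - o - 2 * h - start) / h = 0 :=
      Int.ediv_eq_zero_of_lt hN (by omega)
    simp only [pvAvail, if_pos hle, if_neg hle2, h0]
    omega

theorem pvALoop_eq (T h o : Int) (hh : 0 < h) :
    ∀ (n : Nat) (start : Int),
      pvALoop T h o n start =
        (List.range (min n (pvAvail T h o start))).map (fun (k : Nat) =>
          (start + (k : Int) * h, start + (k : Int) * h + h + o,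
           start + (k : Int) * h + h, start + (k : Int) * h + 2 * h + o)) := by
  intro n
  induction n with
  | zero => intro start; simp [pvALoop]
  | succ n ih =>
    intro start
    rw [pvALoop]
    by_cases hgt : start + 2 * h + o > T
    · rw [if_pos hgt]
      have h0 : pvAvail T h o start = 0 := by simp [pvAvail]; omega
      simp [h0]
    · rw [if_neg hgt]
      have hstep := pvAvail_step T h o start hh (by omega)
      rw [hstep, ih (start + h)]
      have hmin : min (n + 1) (pvAvail T h o (start + h) + 1)
          = min n (pvAvail T h o (start + h)) + 1 := by omega
      rw [hmin, List.range_succ_eq_map, List.map_cons, List.map_map]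
      simp only [Nat.cast_zero, zero_mul, add_zero]
      congr 1
      apply List.map_congr_left
      intro k _
      simp only [Function.comp_apply, Nat.cast_succ, Prod.mk.injEq]
      refine ⟨by ring, by ring, by ring, by ring⟩

theorem build_stream_chunk_pairs_spec : Claim_equal_build_stream_chunk_pairs := by
  intro T h o mp _
  unfold Spec_build_stream_chunk_pairs build_stream_chunk_pairs build_stream_chunk_pairs_alt
  by_cases hg : T ≤ 0 ∨ h ≤ 0 ∨ o ≤ 0 ∨ mp ≤ 0
  · rw [if_pos hg, if_pos hg]
  · rw [if_neg hg, if_neg hg]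
    push Not at hg
    obtain ⟨hT, hh, ho, hmp⟩ := hg
    rw [pvALoop_eq T h o hh mp.toNat 0]
    by_cases hneg : T - o - 2 * h < 0
    · have hav : pvAvail T h o 0 = 0 := by simp [pvAvail]; omega
      rw [if_pos hneg, PySem.List.pyRange_one_eq_nil (by omega)]
      simp [hav]
    · push Not at hneg
      have hav : pvAvail T h o 0 = ((T - o - 2 * h) / h).toNat + 1 := by
        simp only [pvAvail, if_pos (by omega : (0:Int) + 2 * h + o ≤ T)]
        norm_num
      have hfd : PySem.Int.floordiv (T - o - 2 * h) h = (T - o - 2 * h) / h :=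
        PySem.Int.floordiv_eq_ediv_of_pos hh
      have hdnn : 0 ≤ (T - o - 2 * h) / h := Int.ediv_nonneg hneg (le_of_lt hh)
      rw [if_neg (by omega : ¬ T - o - 2 * h < 0), hfd,
        PySem.List.pyRange_one 0 (min mp ((T - o - 2 * h) / h + 1)), List.map_map]
      have hcnt : (min mp ((T - o - 2 * h) / h + 1) - 0).toNat
          = min mp.toNat (((T - o - 2 * h) / h).toNat + 1) := by omega
      rw [hcnt, hav]
      apply List.map_congr_left
      intro k _
      simp only [Function.comp_apply, zero_add]
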